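-- pv_equiv track=rewrite | github.com/Krenuds/blindr | remove_comments.py | find_comment_position
-- ===== SOURCE A (Python) =====
-- def find_comment_position(line):
--     """Find the position of # that starts a comment (not in strings)."""
--     in_string = False
--     string_char = None
--     escape_next = False
--
--     for i, char in enumerate(line):
--         if escape_next:
--             escape_next = False
--             continue
--
--         if char == '\\':
--             escape_next = True
--             continue
--
--         if not in_string:
--             if char in ['"', "'"]:
--                 in_string = True
--                 string_char = char
--             elif char == '#':
--                 return i
--         else:
--             if char == string_char:
--                 in_string = False
--                 string_char = None
--
--     return -1
-- ===== SOURCE B (Python) =====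
-- def find_comment_position(line):
--     """Find the position of # that starts a comment (not in strings)."""
--     # Stage 1: strip escape pairs — keep only "effective" characters (a backslash
--     # consumes itself and the next char, everywhere), remembering original indices.
--     idxs = []
--     chars = []
--     i = 0
--     n = len(line)
--     while i < n:
--         c = line[i]
--         if c == '\\':
--             i += 2
--         else:
--             idxs.append(i)
--             chars.append(c)
--             i += 1
--     # Stage 2: on the effective stream, jump over whole string literals with
--     # list.index; a '#' seen outside a literal wins.
--     k = 0
--     m = len(chars)
--     while k < m:
--         c = chars[k]
--         if c == '#':
--             return idxs[k]
--         if c == '"' or c == "'":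
--             try:
--                 k = chars.index(c, k + 1) + 1
--             except ValueError:
--                 return -1
--         else:
--             k += 1
--     return -1
-- ===== Notes on version B (the rewrite author's own statement) =====
-- stated objective: alternative
-- what changed: Replaces A's one-pass escape/in-string/string-char flag machine by two staged passes: first strip all backslash-escape pairs into an effective (index,char) stream, then search that stream, jumping over whole string literals with list.index instead of tracking per-character string state.
import Mathlib
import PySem

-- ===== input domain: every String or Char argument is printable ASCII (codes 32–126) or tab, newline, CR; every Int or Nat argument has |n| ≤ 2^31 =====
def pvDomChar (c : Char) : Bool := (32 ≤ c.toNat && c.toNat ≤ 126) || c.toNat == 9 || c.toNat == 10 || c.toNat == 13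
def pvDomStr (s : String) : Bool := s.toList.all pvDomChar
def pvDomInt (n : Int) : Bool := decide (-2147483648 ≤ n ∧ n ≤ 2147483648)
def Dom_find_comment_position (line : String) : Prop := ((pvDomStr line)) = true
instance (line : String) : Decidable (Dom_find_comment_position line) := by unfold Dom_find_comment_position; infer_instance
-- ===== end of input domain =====

-- B replaces A's one-pass flag machine by two staged passes: strip escape pairs into an
-- effective (index,char) stream, then jump over whole string literals with an index lookup.

-- ===== PORT A =====
-- A's loop: state (escape_next, in_string, string_char), early return on '#': recursion over chars.
def goA : List Char → Nat → Bool → Option Char → Bool → Int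
  | [], _, _, _, _ => -1
  | c :: rest, i, inStr, sc, esc =>
    if esc then goA rest (i+1) inStr sc false
    else if c = '\\' then goA rest (i+1) inStr sc true
    else if !inStr then
      if c = '"' ∨ c = '\'' then goA rest (i+1) true (some c) false
      else if c = '#' then (i : Int)
      else goA rest (i+1) inStr sc false
    else
      if some c = sc then goA rest (i+1) false none false
      else goA rest (i+1) inStr sc false

def find_comment_position (line : String) : Int :=
  goA line.toList 0 false none false

-- ===== PORT B =====
-- Stage 1 of Source B: drop each backslash together with the char after it, keep (index, char).
def effB : List Char → Nat → List (Nat × Char)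
  | [], _ => []
  | c :: rest, i =>
    if c = '\\' then
      match rest with
      | [] => []
      | _ :: rs => effB rs (i+2)
    else (i, c) :: effB rest (i+1)

-- Source B's chars.index(c, k+1): the effective stream strictly after the first occurrence of q
-- (none = ValueError). Length lemma stated here because outB's termination cites it.
def dropPast (q : Char) : List (Nat × Char) → Option (List (Nat × Char))
  | [] => none
  | (_, c) :: rest => if c = q then some rest else dropPast q rest

theorem dropPast_length (q : Char) : ∀ (l r : List (Nat × Char)),
    dropPast q l = some r → r.length < l.length := by
  intro l
  induction l with
  | nil => intro r h; simp [dropPast] at h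
  | cons p rest ih =>
    intro r h
    obtain ⟨_, c⟩ := p
    by_cases hc : c = q
    · simp [dropPast, hc] at h; subst h; simp
    · simp [dropPast, hc] at h
      exact Nat.lt_succ_of_lt (ih r h)

-- Stage 2 of Source B: walk the effective stream, jumping past each string literal via dropPast.
def outB : List (Nat × Char) → Int
  | [] => -1
  | (idx, c) :: rest =>
    if c = '#' then (idx : Int)
    else if c = '"' ∨ c = '\'' then
      match h : dropPast c rest with
      | none => -1
      | some r => outB r
    else outB rest
termination_by l => l.length
decreasing_by
  · exact Nat.lt_succ_of_lt (dropPast_length c rest r h)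
  · simp

def find_comment_position_alt (line : String) : Int :=
  outB (effB line.toList 0)

-- ===== PRECONDITION & SPEC =====
def Spec_find_comment_position (line : String) (out : Int) : Prop := out = find_comment_position_alt line
instance (line : String) (out : Int) : Decidable (Spec_find_comment_position line out) := by unfold Spec_find_comment_position; infer_instance

-- ===== CLAIM (what is proved, stated in full; the proofs are below) =====
def Claim_equal_find_comment_position : Prop := ∀ (line : String), Dom_find_comment_position line → Spec_find_comment_position line (find_comment_position line)

-- ===== LEMMAS AND PROOFS =====

-- Unfolding lemma for the well-founded outB (its equation is awkward to cite directly).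
theorem outB_cons (idx : Nat) (c : Char) (rest : List (Nat × Char)) :
    outB ((idx, c) :: rest) =
      if c = '#' then (idx : Int)
      else if c = '"' ∨ c = '\'' then
        match dropPast c rest with
        | none => -1
        | some r => outB r
      else outB rest := by
  rw [outB]
  rcases dropPast c rest with _ | r <;> rfl

-- In-string continuation of B: the rest of stage 2 once a literal opened by q is being skipped.
def strB (q : Char) (eff : List (Nat × Char)) : Int :=
  match dropPast q eff with
  | none => -1
  | some r => outB r

-- effB on a non-backslash head char.
theorem effB_cons (c : Char) (rest : List Char) (i : Nat) (h : ¬ c = '\\') :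
    effB (c :: rest) i = (i, c) :: effB rest (i+1) := by
  match rest with
  | [] => simp [effB, h]
  | r :: rs => simp [effB, h]

-- Joint invariant: outside strings A's machine computes outB of the effective stream of the
-- remaining input; inside a string opened by q (q ≠ '\\') it computes strB of that stream.
theorem goA_eq_outB_aux (n : Nat) : ∀ (cs : List Char), cs.length ≤ n →
    (∀ i, goA cs i false none false = outB (effB cs i)) ∧
    (∀ i q, q ≠ '\\' → goA cs i true (some q) false = strB q (effB cs i)) := by
  induction n with
  | zero =>
    intro cs hlen
    have : cs = [] := List.eq_nil_of_length_eq_zero (Nat.le_zero.mp hlen)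
    subst this
    simp [goA, effB, outB, strB, dropPast]
  | succ n ih =>
    intro cs hlen
    match cs with
    | [] => simp [goA, effB, outB, strB, dropPast]
    | c :: rest =>
      have hr : rest.length ≤ n := by simpa using hlen
      have hr1 : (rest.drop 1).length ≤ n := le_trans (by simp) hr
      constructor
      · intro i
        by_cases hb : c = '\\'
        · subst hb
          match rest with
          | [] => simp [goA, effB, outB]
          | r :: rs =>
            have := (ih rs (by simpa using hr1)).1 (i+2)
            simp [goA, effB, this]
        · by_cases hq : c = '"' ∨ c = '\''
          · have hch : ¬ c = '#' := by rcases hq with h | h <;> subst h <;> decide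
            have := (ih rest hr).2 (i+1) c (by rcases hq with h | h <;> subst h <;> decide)
            simp [goA, hb, hq, hch, this, strB, effB_cons, outB_cons]
          · by_cases hh : c = '#'
            · subst hh
              simp [goA, effB_cons, outB_cons]
            · have := (ih rest hr).1 (i+1)
              simp [goA, hb, hq, hh, this, effB_cons, outB_cons]
      · intro i q hqne
        by_cases hc : c = q
        · subst hc
          have := (ih rest hr).1 (i+1)
          simp [goA, strB, dropPast, hqne, this, effB_cons]
        · by_cases hb : c = '\\'
          · subst hb
            match rest with
            | [] => simp [goA, effB, strB, dropPast]
            | r :: rs =>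
              have := (ih rs (by simpa using hr1)).2 (i+2) q hqne
              simp [goA, effB, strB, this]
          · have := (ih rest hr).2 (i+1) q hqne
            simp [goA, strB, dropPast, hb, hc, this, effB_cons]

-- ===== VERDICT (by name: the statement is the Claim_ definition above) =====
theorem find_comment_position_spec : Claim_equal_find_comment_position := by
  intro line _
  unfold Spec_find_comment_position find_comment_position find_comment_position_alt
  exact (goA_eq_outB_aux line.toList.length line.toList le_rfl).1 0
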